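-- pv_equiv track=rewrite | github.com/Yaliherrera02/Labo_de_datos_2doCuat_2024 | clase1/resueltos_clase1.py | traductor_geringoso
-- ===== SOURCE A (Python) =====
-- def  traductor_geringoso(lista):
--     diccionario = {}
--     for i in range(len(lista)):
--         nueva_palabra=""
--         palabra=lista[i]
--         for c in palabra:
--             if c=="a":
--                 nueva_palabra+=c+"pa"
--             elif c=="e":
--                 nueva_palabra+=c+"pe"
--             elif c=="i":
--                 nueva_palabra+= c+"pi"
--             elif c=="o":
--                 nueva_palabra+=c+"po"
--             elif c=="u":
--                 nueva_palabra+=c+"pu"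
--             else:
--                 nueva_palabra+=c
--
--         diccionario[palabra]=nueva_palabra
--
--
--     return diccionario
-- ===== SOURCE B (Python) =====
-- def traductor_geringoso(lista):
--     return {
--         palabra: palabra.replace("a", "apa").replace("e", "epe")
--                         .replace("i", "ipi").replace("o", "opo")
--                         .replace("u", "upu")
--         for palabra in lista
--     }
-- ===== Notes on version B (the rewrite author's own statement) =====
-- stated objective: idiomatic
-- what changed: Replaces the per-character if/elif accumulation loop with five whole-string str.replace scans per word and builds the dict with a comprehension over the word list.
import Mathlib
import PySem

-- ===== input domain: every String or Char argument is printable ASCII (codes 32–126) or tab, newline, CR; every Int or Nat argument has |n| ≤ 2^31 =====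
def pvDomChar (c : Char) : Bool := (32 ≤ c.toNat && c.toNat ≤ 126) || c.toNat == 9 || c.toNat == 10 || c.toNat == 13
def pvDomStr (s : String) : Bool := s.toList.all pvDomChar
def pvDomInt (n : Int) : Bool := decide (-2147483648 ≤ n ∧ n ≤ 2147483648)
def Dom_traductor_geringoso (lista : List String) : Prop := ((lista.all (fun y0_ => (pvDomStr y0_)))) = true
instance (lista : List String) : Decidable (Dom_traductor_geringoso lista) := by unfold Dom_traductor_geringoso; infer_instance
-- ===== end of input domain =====

-- B replaces A's per-character if/elif accumulation with five whole-string replace scans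
-- per word and a dict comprehension (idiomatic; same asymptotic cost).


-- ===== PORT A =====
-- inner loop of A: per-character if/elif chain accumulating nueva_palabra
def geringosoWordA (palabra : String) : String :=
  String.ofList (palabra.toList.foldl (fun nueva c =>
    if c = 'a' then nueva ++ [c, 'p', 'a']
    else if c = 'e' then nueva ++ [c, 'p', 'e']
    else if c = 'i' then nueva ++ [c, 'p', 'i']
    else if c = 'o' then nueva ++ [c, 'p', 'o']
    else if c = 'u' then nueva ++ [c, 'p', 'u']
    else nueva ++ [c]) [])

def traductor_geringoso (lista : List String) : List (String × String) :=
  (lista.foldl (fun d palabra => d.insert palabra (geringosoWordA palabra))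
    (PySem.Dict.mk ([] : List (String × String)))).items

-- ===== PORT B =====
-- B's transform: five chained whole-string replaces
def geringosoWordB (palabra : String) : String :=
  PySem.Str.replace (PySem.Str.replace (PySem.Str.replace (PySem.Str.replace
    (PySem.Str.replace palabra "a" "apa") "e" "epe") "i" "ipi") "o" "opo") "u" "upu"

def traductor_geringoso_alt (lista : List String) : List (String × String) :=
  (lista.foldl (fun d palabra => d.insert palabra (geringosoWordB palabra))
    (PySem.Dict.mk ([] : List (String × String)))).items

-- ===== PRECONDITION & SPEC =====
def Spec_traductor_geringoso (lista : List String) (out : List (String × String)) : Prop := out = traductor_geringoso_alt lista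
instance (lista : List String) (out : List (String × String)) : Decidable (Spec_traductor_geringoso lista out) := by unfold Spec_traductor_geringoso; infer_instance

-- ===== CLAIM (what is proved, stated in full; the proofs are below) =====
def Claim_equal_traductor_geringoso : Prop := ∀ (lista : List String), Dom_traductor_geringoso lista → Spec_traductor_geringoso lista (traductor_geringoso lista)

-- ===== LEMMAS AND PROOFS =====

-- single-character-pattern replace is a flatMap over the characters
theorem go_single (v : Char) (new : List Char) :
    ∀ (l : List Char) (fuel : Nat) (acc : List Char), l.length ≤ fuel →
      PySem.Chars.replace.go [v] new fuel l acc
        = acc.reverse ++ l.flatMap (fun c => if c = v then new else [c]) := by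
  intro l
  induction l with
  | nil =>
    intro fuel acc _
    cases fuel <;> simp [PySem.Chars.replace.go]
  | cons c t ih =>
    intro fuel acc h
    cases fuel with
    | zero => simp at h
    | succ f =>
      simp only [PySem.Chars.replace.go]
      by_cases hv : c = v
      · subst hv
        have hpre : List.isPrefixOf [c] (c :: t) = true := by
          simp [List.isPrefixOf]
        rw [hpre]
        simp only [if_true, List.length_cons, List.length_nil, List.drop_succ_cons, List.drop_zero] at *
        rw [ih f (new.reverse ++ acc) (by omega)]
        simp
      · have hpre : List.isPrefixOf [v] (c :: t) = false := by
          simp [List.isPrefixOf]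
          intro h'; exact absurd h'.symm hv
        rw [hpre]
        simp only [Bool.false_eq_true, if_false]
        simp only [List.length_cons] at h
        rw [ih f (c :: acc) (by omega)]
        simp [hv]

theorem replace_single (cs : List Char) (v : Char) (new : List Char) :
    PySem.Chars.replace cs [v] new = cs.flatMap (fun c => if c = v then new else [c]) := by
  rw [PySem.Chars.replace]
  simp only [List.isEmpty_cons, Bool.false_eq_true, if_false]
  exact go_single v new cs cs.length [] (le_refl _)

-- the vowel expansion both programs compute, per character
def expandChar (c : Char) : List Char :=
  if c = 'a' then ['a', 'p', 'a']
  else if c = 'e' then ['e', 'p', 'e']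
  else if c = 'i' then ['i', 'p', 'i']
  else if c = 'o' then ['o', 'p', 'o']
  else if c = 'u' then ['u', 'p', 'u']
  else [c]

theorem foldA_eq (cs : List Char) : ∀ acc : List Char,
    cs.foldl (fun nueva c =>
      if c = 'a' then nueva ++ [c, 'p', 'a']
      else if c = 'e' then nueva ++ [c, 'p', 'e']
      else if c = 'i' then nueva ++ [c, 'p', 'i']
      else if c = 'o' then nueva ++ [c, 'p', 'o']
      else if c = 'u' then nueva ++ [c, 'p', 'u']
      else nueva ++ [c]) acc = acc ++ cs.flatMap expandChar := by
  induction cs with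
  | nil => intro acc; simp
  | cons c t ih =>
    intro acc
    simp only [List.foldl_cons, List.flatMap_cons, ih]
    by_cases h1 : c = 'a' <;> by_cases h2 : c = 'e' <;> by_cases h3 : c = 'i' <;>
      by_cases h4 : c = 'o' <;> by_cases h5 : c = 'u' <;>
      simp_all [expandChar]

theorem chainB_eq (cs : List Char) :
    ((((cs.flatMap (fun c => if c = 'a' then "apa".toList else [c])).flatMap
        (fun c => if c = 'e' then "epe".toList else [c])).flatMap
        (fun c => if c = 'i' then "ipi".toList else [c])).flatMap
        (fun c => if c = 'o' then "opo".toList else [c])).flatMap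
        (fun c => if c = 'u' then "upu".toList else [c])
      = cs.flatMap expandChar := by
  induction cs with
  | nil => simp
  | cons c t ih =>
    simp only [List.flatMap_cons, List.flatMap_append, ih]
    congr 1
    by_cases h1 : c = 'a' <;> by_cases h2 : c = 'e' <;> by_cases h3 : c = 'i' <;>
      by_cases h4 : c = 'o' <;> by_cases h5 : c = 'u' <;>
      simp_all [expandChar]

theorem word_eq (p : String) : geringosoWordA p = geringosoWordB p := by
  have hB : (geringosoWordB p).toList = p.toList.flatMap expandChar := by
    simp only [geringosoWordB, PySem.Str.toList_replace,
      (by decide : "a".toList = ['a']), (by decide : "e".toList = ['e']),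
      (by decide : "i".toList = ['i']), (by decide : "o".toList = ['o']),
      (by decide : "u".toList = ['u']), replace_single]
    exact chainB_eq p.toList
  rw [geringosoWordA, foldA_eq, List.nil_append, ← hB, String.ofList_toList]

-- ===== VERDICT (by name: the statement is the Claim_ definition above) =====
theorem traductor_geringoso_spec : Claim_equal_traductor_geringoso := by
  intro lista _
  unfold Spec_traductor_geringoso traductor_geringoso traductor_geringoso_alt
  simp only [word_eq]
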